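-- pv_equiv track=rewrite | github.com/ben-aaron188/textwash | utils.py | get_cut_idx
-- ===== SOURCE A (Python) =====
-- def get_cut_idx(string, pad):
--     last_valid_idx = len(string)
--
--     for i in reversed(range(len(string))):
--         if string[i] == pad:
--             last_valid_idx -= 1
--         else:
--             break
--
--     return last_valid_idx
-- ===== SOURCE B (Python) =====
-- def get_cut_idx(string, pad):
--     result = 0
--     for i, ch in enumerate(string):
--         if ch != pad:
--             result = i + 1
--     return result
-- ===== Notes on version B (the rewrite author's own statement) =====
-- stated objective: alternative
-- what changed: B replaces A's backward count of the trailing pad run (with early break) by a single forward pass that keeps the index just past the last non-pad character.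
import Mathlib
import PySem

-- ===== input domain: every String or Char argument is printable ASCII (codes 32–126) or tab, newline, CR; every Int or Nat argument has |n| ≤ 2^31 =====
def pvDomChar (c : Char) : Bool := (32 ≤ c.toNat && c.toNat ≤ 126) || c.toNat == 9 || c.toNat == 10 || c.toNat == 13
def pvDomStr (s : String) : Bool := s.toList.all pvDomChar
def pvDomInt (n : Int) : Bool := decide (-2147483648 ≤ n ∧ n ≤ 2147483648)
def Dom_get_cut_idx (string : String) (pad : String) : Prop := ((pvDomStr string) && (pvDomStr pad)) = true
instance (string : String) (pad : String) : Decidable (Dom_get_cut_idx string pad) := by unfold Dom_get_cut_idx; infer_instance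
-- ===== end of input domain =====

-- B replaces the backward trailing-pad count of A by one forward pass maintaining the index past the last non-pad char (alternative decomposition, same cost).


-- ===== PORT A =====
-- A: count the trailing run of characters equal to pad (the reversed loop with break),
-- then subtract it from len(string).  string[i] is a 1-char string, compared to pad as [c] = pad.toList.
def pvTrailingRun (pad : List Char) : List Char → Nat
  | [] => 0
  | c :: rest => if [c] = pad then 1 + pvTrailingRun pad rest else 0

def get_cut_idx (string : String) (pad : String) : Int :=
  (string.toList.length : Int) - (pvTrailingRun pad.toList string.toList.reverse : Int)

-- ===== PORT B =====
-- B: one forward pass over enumerate(string); result := i+1 at every non-pad character.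
def get_cut_idx_alt (string : String) (pad : String) : Int :=
  (PySem.List.enumerate string.toList).foldl
    (fun acc p => if [p.2] ≠ pad.toList then p.1 + 1 else acc) 0

-- ===== PRECONDITION & SPEC =====
def Spec_get_cut_idx (string : String) (pad : String) (out : Int) : Prop := out = get_cut_idx_alt string pad
instance (string : String) (pad : String) (out : Int) : Decidable (Spec_get_cut_idx string pad out) := by unfold Spec_get_cut_idx; infer_instance

-- ===== CLAIM (what is proved, stated in full; the proofs are below) =====
def Claim_equal_get_cut_idx : Prop := ∀ (string : String) (pad : String), Dom_get_cut_idx string pad → Spec_get_cut_idx string pad (get_cut_idx string pad)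

-- ===== LEMMAS AND PROOFS =====

-- ===== VERDICT (by name: the statement is the Claim_ definition above) =====
theorem pv_key (pad : List Char) (cs : List Char) :
    (PySem.List.enumerate cs).foldl
      (fun acc p => if [p.2] ≠ pad then p.1 + 1 else acc) 0
    = (cs.length : Int) - (pvTrailingRun pad cs.reverse : Int) := by
  induction cs using List.reverseRecOn with
  | nil => simp [PySem.List.enumerate, pvTrailingRun]
  | append_singleton cs c ih =>
    rw [PySem.List.enumerate_append, List.foldl_append]
    simp only [PySem.List.enumerate, List.foldl]
    rw [ih, List.reverse_append, List.reverse_singleton, List.singleton_append]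
    simp only [pvTrailingRun]
    by_cases h : [c] = pad
    · rw [if_neg (by simp [h]), if_pos h]
      simp only [List.length_append, List.length_singleton]
      omega
    · rw [if_pos h, if_neg h]
      simp only [List.length_append, List.length_singleton]
      omega

theorem get_cut_idx_spec : Claim_equal_get_cut_idx := by
  intro string pad _
  unfold Spec_get_cut_idx get_cut_idx get_cut_idx_alt
  exact (pv_key pad.toList string.toList).symm
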